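-- pv_equiv track=rewrite | github.com/jmaccabee/advent-of-code-2019 | puzzles/day4/part2.py | has_unique_adjacent_integer
-- ===== SOURCE A (Python) =====
-- def has_unique_adjacent_integer(password, repeated_ints):
--     for repeat in repeated_ints:
--         count = 0
--         for i in range(len(password)-1):
--             if repeat == f"{password[i]}{password[i+1]}":
--                 count += 1
--         if count == 1:
--             return True
--     return False
-- ===== SOURCE B (Python) =====
-- def has_unique_adjacent_integer(password, repeated_ints):
--     counts = {}
--     for i in range(len(password) - 1):
--         pair = password[i] + password[i + 1]
--         counts[pair] = counts.get(pair, 0) + 1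
--     return any(counts.get(repeat, 0) == 1 for repeat in repeated_ints)
-- ===== Notes on version B (the rewrite author's own statement) =====
-- stated objective: faster
-- what changed: B precomputes the counts of all adjacent character pairs in one pass into a dict, then answers each candidate with an O(1) lookup, instead of A's rescan of the whole password per candidate.
import Mathlib
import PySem

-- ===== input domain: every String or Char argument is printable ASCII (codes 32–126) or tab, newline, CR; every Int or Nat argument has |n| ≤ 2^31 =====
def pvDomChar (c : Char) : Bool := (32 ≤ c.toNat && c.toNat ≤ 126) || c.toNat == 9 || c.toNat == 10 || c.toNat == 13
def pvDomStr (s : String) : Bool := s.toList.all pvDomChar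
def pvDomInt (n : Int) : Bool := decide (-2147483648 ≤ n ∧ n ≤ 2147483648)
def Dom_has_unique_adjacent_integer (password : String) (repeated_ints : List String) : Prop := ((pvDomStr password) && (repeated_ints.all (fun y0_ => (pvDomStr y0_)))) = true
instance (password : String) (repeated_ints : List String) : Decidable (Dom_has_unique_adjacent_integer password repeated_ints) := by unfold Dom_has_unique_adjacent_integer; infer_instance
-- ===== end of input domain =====

-- B replaces A's per-candidate rescan of the password by a single pass that counts all
-- adjacent pairs into a dict, then one O(1) lookup per candidate (objective: faster).

-- ===== PORT A =====
-- f"{password[i]}{password[i+1]}" (i always in range inside the loop)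
def pvPairAt (cs : List Char) (i : Int) : String :=
  String.ofList [PySem.List.pyGetD cs i ' ', PySem.List.pyGetD cs (i + 1) ' ']

-- the outer 'for repeat in repeated_ints' with its early return
def pvAGo (cs : List Char) : List String → Bool
  | [] => false
  | r :: rest =>
    let count := (PySem.List.pyRange 0 ((cs.length : Int) - 1) 1).foldl
        (fun c i => if r == pvPairAt cs i then c + 1 else c) (0 : Int)
    if count = 1 then true else pvAGo cs rest

def has_unique_adjacent_integer (password : String) (repeated_ints : List String) : Bool :=
  pvAGo password.toList repeated_ints

-- ===== PORT B =====
def has_unique_adjacent_integer_alt (password : String) (repeated_ints : List String) : Bool :=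
  let cs := password.toList
  let counts := (PySem.List.pyRange 0 ((cs.length : Int) - 1) 1).foldl
      (fun d i =>
        let pair := pvPairAt cs i
        d.insert pair (d.getD pair 0 + 1))
      (PySem.Dict.empty : PySem.Dict String Int)
  repeated_ints.any (fun r => counts.getD r 0 == 1)

-- ===== PRECONDITION & SPEC =====
def Spec_has_unique_adjacent_integer (password : String) (repeated_ints : List String) (out : Bool) : Prop := out = has_unique_adjacent_integer_alt password repeated_ints
instance (password : String) (repeated_ints : List String) (out : Bool) : Decidable (Spec_has_unique_adjacent_integer password repeated_ints out) := by unfold Spec_has_unique_adjacent_integer; infer_instance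

-- ===== CLAIM (what is proved, stated in full; the proofs are below) =====
def Claim_equal_has_unique_adjacent_integer : Prop := ∀ (password : String) (repeated_ints : List String), Dom_has_unique_adjacent_integer password repeated_ints → Spec_has_unique_adjacent_integer password repeated_ints (has_unique_adjacent_integer password repeated_ints)

-- ===== LEMMAS AND PROOFS =====

-- A's inner-loop count for candidate r equals the count of r in the list of adjacent pairs
theorem pvA_count_eq (cs : List Char) (r : String) :
    (PySem.List.pyRange 0 ((cs.length : Int) - 1) 1).foldl
        (fun c i => if r == pvPairAt cs i then c + 1 else c) (0 : Int)
      = (((PySem.List.pyRange 0 ((cs.length : Int) - 1) 1).map (pvPairAt cs)).count r : Int) := by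
  rw [← List.foldl_map (f := pvPairAt cs)
      (g := fun c x => if r == x then c + 1 else c)]
  rw [PySem.List.foldl_count_if (fun x => r == x)]
  rw [List.countP_congr (q := fun x => x == r) (fun x _ => by simp [BEq.comm])]
  simp [List.count]

-- B's dict lookup for r equals the same count
theorem pvB_getD_eq (cs : List Char) (r : String) :
    ((PySem.List.pyRange 0 ((cs.length : Int) - 1) 1).foldl
        (fun d i =>
          let pair := pvPairAt cs i
          d.insert pair (d.getD pair 0 + 1))
        (PySem.Dict.empty : PySem.Dict String Int)).getD r 0
      = (((PySem.List.pyRange 0 ((cs.length : Int) - 1) 1).map (pvPairAt cs)).count r : Int) := by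
  have h : (fun (d : PySem.Dict String Int) (i : Int) =>
      let pair := pvPairAt cs i
      d.insert pair (d.getD pair 0 + 1))
      = fun d i => d.insert (pvPairAt cs i) (d.getD (pvPairAt cs i) 0 + 1) := rfl
  rw [h, ← List.foldl_map (f := pvPairAt cs)
      (g := fun (d : PySem.Dict String Int) x => d.insert x (d.getD x 0 + 1))]
  rw [PySem.Dict.getD_foldl_insert_add_one]
  simp

theorem pvAGo_eq_any (cs : List Char) (l : List String) :
    pvAGo cs l = l.any (fun r =>
      (((PySem.List.pyRange 0 ((cs.length : Int) - 1) 1).map (pvPairAt cs)).count r : Int) == 1) := by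
  induction l with
  | nil => rfl
  | cons r rest ih =>
    simp only [pvAGo, pvA_count_eq, List.any_cons, ih]
    by_cases h : (((PySem.List.pyRange 0 ((cs.length : Int) - 1) 1).map (pvPairAt cs)).count r : Int) = 1
    · simp [h]
    · simp [h]

-- ===== VERDICT (by name: the statement is the Claim_ definition above) =====
theorem has_unique_adjacent_integer_spec : Claim_equal_has_unique_adjacent_integer := by
  intro password repeated_ints _
  unfold Spec_has_unique_adjacent_integer has_unique_adjacent_integer has_unique_adjacent_integer_alt
  rw [pvAGo_eq_any]
  simp only [pvB_getD_eq]
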